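-- pv_equiv track=rewrite | github.com/NikosKalio/usd_layout_creator | LLM_chain/LLM_chain/retrieval_utils.py | calculate_rear_panels_constrained
-- ===== SOURCE A (Python) =====
-- def calculate_rear_panels_constrained(L_cabinet):
--     # Calculate maximum a and b
--     a_max = (L_cabinet + 749) // 750
--     b_max = (L_cabinet + 999) // 1000
--
--     # Generate all possible configurations from 0 to max
--     candidates = [
--         {"a": a, "b": b, "spacing": a * 750 + b * 1000 - L_cabinet}
--         for a in range(a_max + 1)
--         for b in range(b_max + 1)
--         if a * 750 + b * 1000 >= L_cabinet
--     ]
--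
--     # Select the configuration with the smallest spacing
--     if not candidates:
--         return None
--
--     best_config = min(candidates, key=lambda c: c["spacing"])
--     return best_config
-- ===== SOURCE B (Python) =====
-- def calculate_rear_panels_constrained(L_cabinet):
--     # One pass over the panel count a; for each a the best b is forced in closed form.
--     a_max = (L_cabinet + 749) // 750
--     best = None  # (a, b, spacing)
--     for a in range(a_max + 1):
--         b = max(0, (L_cabinet - 750 * a + 999) // 1000)
--         s = 750 * a + 1000 * b - L_cabinet
--         if best is None or s < best[2]:
--             best = (a, b, s)
--     if best is None:
--         return None
--     return {"a": best[0], "b": best[1], "spacing": best[2]}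
-- ===== Notes on version B (the rewrite author's own statement) =====
-- stated objective: faster
-- what changed: A enumerates all (a,b) pairs up to (a_max,b_max) and takes min by spacing; B does a single pass over a only, computing the optimal b for each a in closed form as max(0, ceil((L-750a)/1000)) and tracking the running best with strict improvement (so the smallest a, then smallest b, wins exactly as in A).
import Mathlib
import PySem

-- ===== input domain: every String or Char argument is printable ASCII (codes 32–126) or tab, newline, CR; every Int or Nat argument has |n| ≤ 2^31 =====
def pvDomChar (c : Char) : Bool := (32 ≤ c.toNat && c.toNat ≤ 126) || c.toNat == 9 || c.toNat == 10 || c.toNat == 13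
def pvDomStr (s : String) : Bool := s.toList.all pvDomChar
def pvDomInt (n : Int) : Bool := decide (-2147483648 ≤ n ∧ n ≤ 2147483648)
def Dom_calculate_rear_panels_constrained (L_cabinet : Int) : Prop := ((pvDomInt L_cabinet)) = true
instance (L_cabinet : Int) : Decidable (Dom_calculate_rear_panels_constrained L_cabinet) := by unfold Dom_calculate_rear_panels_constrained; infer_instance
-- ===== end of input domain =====

-- B replaces A's quadratic scan over all (a, b) pairs by a single pass over a with the
-- optimal b for each a computed in closed form (objective: faster, asymptotic O(L²)→O(L)).

-- ===== PORT A =====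
-- key of min(candidates, key=lambda c: c["spacing"]); on A's dicts the key is always present
-- hand port of c["spacing"]: first match in the assoc list (exact: the key is always present in A's dicts)
def pvKeyS (c : List (String × Int)) : Int := ((c.find? (fun p => p.1 == "spacing")).map (fun p => p.2)).getD 0

def calculate_rear_panels_constrained (L_cabinet : Int) : Option (List (String × Int)) :=
  let a_max := PySem.Int.floordiv (L_cabinet + 749) 750
  let b_max := PySem.Int.floordiv (L_cabinet + 999) 1000
  let candidates := (PySem.List.pyRange 0 (a_max + 1) 1).flatMap (fun a =>
    ((PySem.List.pyRange 0 (b_max + 1) 1).filter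
        (fun b => decide (a * 750 + b * 1000 ≥ L_cabinet))).map
      (fun b => [("a", a), ("b", b), ("spacing", a * 750 + b * 1000 - L_cabinet)]))
  if candidates = [] then none
  else PySem.List.min? candidates pvKeyS

-- ===== PORT B =====
-- B's loop body (the body of 'for a in range(a_max + 1)' in Source B), as a named helper
def pvStepB (L_cabinet : Int) (best : Option (Int × Int × Int)) (a : Int) : Option (Int × Int × Int) :=
  let b := max 0 (PySem.Int.floordiv (L_cabinet - 750 * a + 999) 1000)
  let s := 750 * a + 1000 * b - L_cabinet
  match best with
  | none => some (a, b, s)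
  | some t => if s < t.2.2 then some (a, b, s) else some t

def calculate_rear_panels_constrained_alt (L_cabinet : Int) : Option (List (String × Int)) :=
  let a_max := PySem.Int.floordiv (L_cabinet + 749) 750
  let best := (PySem.List.pyRange 0 (a_max + 1) 1).foldl (pvStepB L_cabinet) none
  match best with
  | none => none
  | some (a, b, s) => some [("a", a), ("b", b), ("spacing", s)]

-- ===== PRECONDITION & SPEC =====
def Spec_calculate_rear_panels_constrained (L_cabinet : Int) (out : Option (List (String × Int))) : Prop := out = calculate_rear_panels_constrained_alt L_cabinet
instance (L_cabinet : Int) (out : Option (List (String × Int))) : Decidable (Spec_calculate_rear_panels_constrained L_cabinet out) := by unfold Spec_calculate_rear_panels_constrained; infer_instance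

-- ===== CLAIM (what is proved, stated in full; the proofs are below) =====
def Claim_equal_calculate_rear_panels_constrained : Prop := ∀ (L_cabinet : Int), Dom_calculate_rear_panels_constrained L_cabinet → Spec_calculate_rear_panels_constrained L_cabinet (calculate_rear_panels_constrained L_cabinet)

-- ===== LEMMAS AND PROOFS =====

-- the step of PySem.List.min? with key pvKeyS
def pvMinStep (acc : Option (List (String × Int))) (x : List (String × Int)) : Option (List (String × Int)) :=
  match acc with
  | none => some x
  | some m => if pvKeyS x < pvKeyS m then some x else some m

def pvToDict (t : Int × Int × Int) : List (String × Int) :=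
  [("a", t.1), ("b", t.2.1), ("spacing", t.2.2)]

lemma pvMin?_eq_foldl (xs : List (List (String × Int))) :
    PySem.List.min? xs pvKeyS = xs.foldl pvMinStep none := by
  unfold PySem.List.min?
  congr 1
  funext acc x
  cases acc <;> rfl

lemma pvKeyS_mk (a b s : Int) : pvKeyS [("a", a), ("b", b), ("spacing", s)] = s := rfl

lemma pvFoldl_min_keep (t : List (List (String × Int))) (m : List (String × Int))
    (h : ∀ y ∈ t, ¬ pvKeyS y < pvKeyS m) :
    t.foldl pvMinStep (some m) = some m := by
  induction t with
  | nil => rfl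
  | cons x t ih =>
    have hx : ¬ pvKeyS x < pvKeyS m := h x (by simp)
    simp only [List.foldl_cons, pvMinStep, if_neg hx]
    exact ih (fun y hy => h y (by simp [hy]))

lemma pvFoldl_min_head (acc : Option (List (String × Int))) (x : List (String × Int))
    (t : List (List (String × Int))) (h : ∀ y ∈ t, pvKeyS x ≤ pvKeyS y) :
    (x :: t).foldl pvMinStep acc = pvMinStep acc x := by
  cases acc with
  | none =>
    simp only [List.foldl_cons, pvMinStep]
    exact pvFoldl_min_keep t x (fun y hy => by have := h y hy; omega)
  | some m =>
    simp only [List.foldl_cons, pvMinStep]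
    by_cases hc : pvKeyS x < pvKeyS m
    · rw [if_pos hc]
      exact pvFoldl_min_keep t x (fun y hy => by have := h y hy; omega)
    · rw [if_neg hc]
      exact pvFoldl_min_keep t m (fun y hy => by have := h y hy; omega)

-- the filtered inner range is the contiguous range from the closed-form optimal b
lemma pvFilter_range (L a : Int) (hL : -749 ≤ L) (ha : 0 ≤ a) :
    (PySem.List.pyRange 0 (PySem.Int.floordiv (L + 999) 1000 + 1) 1).filter
        (fun b => decide (a * 750 + b * 1000 ≥ L)) =
      PySem.List.pyRange (max 0 (PySem.Int.floordiv (L - 750 * a + 999) 1000))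
        (PySem.Int.floordiv (L + 999) 1000 + 1) 1 := by
  rw [PySem.Int.floordiv_eq_ediv_of_pos (a := L + 999) (show (0:Int) < 1000 by norm_num),
      PySem.Int.floordiv_eq_ediv_of_pos (a := L - 750 * a + 999) (show (0:Int) < 1000 by norm_num)]
  set q := (L - 750 * a + 999) / 1000 with hq
  set B := (L + 999) / 1000 with hB
  have hq0 : max 0 q ≤ B + 1 := by omega
  rw [PySem.List.pyRange_one_append 0 (max 0 q) (B + 1) (by omega) hq0, List.filter_append]
  have h1 : (PySem.List.pyRange 0 (max 0 q) 1).filter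
      (fun b => decide (a * 750 + b * 1000 ≥ L)) = [] := by
    rw [List.filter_eq_nil_iff]
    intro b hb
    rw [PySem.List.mem_pyRange_one] at hb
    simp only [decide_eq_true_eq, not_le]
    omega
  have h2 : (PySem.List.pyRange (max 0 q) (B + 1) 1).filter
      (fun b => decide (a * 750 + b * 1000 ≥ L)) =
      PySem.List.pyRange (max 0 q) (B + 1) 1 := by
    rw [List.filter_eq_self]
    intro b hb
    rw [PySem.List.mem_pyRange_one] at hb
    simp only [decide_eq_true_eq, ge_iff_le]
    omega
  rw [h1, h2, List.nil_append]

-- folding min? over one inner block is one pvMinStep with the closed-form candidate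
lemma pvBlock_fold (L a : Int) (hL : -749 ≤ L) (ha : 0 ≤ a)
    (acc : Option (List (String × Int))) :
    (((PySem.List.pyRange 0 (PySem.Int.floordiv (L + 999) 1000 + 1) 1).filter
        (fun b => decide (a * 750 + b * 1000 ≥ L))).map
      (fun b => [("a", a), ("b", b), ("spacing", a * 750 + b * 1000 - L)])).foldl pvMinStep acc =
    pvMinStep acc [("a", a), ("b", max 0 (PySem.Int.floordiv (L - 750 * a + 999) 1000)),
      ("spacing", a * 750 + (max 0 (PySem.Int.floordiv (L - 750 * a + 999) 1000)) * 1000 - L)] := by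
  rw [pvFilter_range L a hL ha]
  set bo := max 0 (PySem.Int.floordiv (L - 750 * a + 999) 1000) with hbo
  have hlt : bo < PySem.Int.floordiv (L + 999) 1000 + 1 := by
    rw [PySem.Int.floordiv_eq_ediv_of_pos (a := L + 999) (show (0:Int) < 1000 by norm_num)]
    rw [hbo, PySem.Int.floordiv_eq_ediv_of_pos (a := L - 750 * a + 999) (show (0:Int) < 1000 by norm_num)]
    omega
  rw [PySem.List.pyRange_one_cons hlt, List.map_cons]
  apply pvFoldl_min_head
  intro y hy
  simp only [List.mem_map] at hy
  obtain ⟨b, hb, rfl⟩ := hy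
  rw [PySem.List.mem_pyRange_one] at hb
  rw [pvKeyS_mk, pvKeyS_mk]
  omega

-- B's loop simulates A's reduced loop through pvToDict
lemma pvFold_corr (L : Int) (l : List Int) (o : Option (Int × Int × Int)) :
    l.foldl (fun acc a => pvMinStep acc
        [("a", a), ("b", max 0 (PySem.Int.floordiv (L - 750 * a + 999) 1000)),
         ("spacing", a * 750 + (max 0 (PySem.Int.floordiv (L - 750 * a + 999) 1000)) * 1000 - L)])
      (o.map pvToDict) =
    (l.foldl (pvStepB L) o).map pvToDict := by
  induction l generalizing o with
  | nil => rfl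
  | cons a l ih =>
    rw [List.foldl_cons, List.foldl_cons, ← ih]
    congr 1
    cases o with
    | none =>
      simp only [Option.map_none, pvMinStep, pvStepB]
      norm_num [pvToDict]
      ring
    | some t =>
      obtain ⟨a', b', s'⟩ := t
      simp only [Option.map_some, pvMinStep, pvStepB, pvToDict, pvKeyS_mk]
      have : a * 750 + max 0 (PySem.Int.floordiv (L - 750 * a + 999) 1000) * 1000 - L
           = 750 * a + 1000 * max 0 (PySem.Int.floordiv (L - 750 * a + 999) 1000) - L := by ring
      rw [this]
      split_ifs <;> simp [pvToDict]

-- ===== VERDICT (by name: the statement is the Claim_ definition above) =====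
theorem calculate_rear_panels_constrained_spec : Claim_equal_calculate_rear_panels_constrained := by
  intro L _
  unfold Spec_calculate_rear_panels_constrained
  unfold calculate_rear_panels_constrained calculate_rear_panels_constrained_alt
  simp only []
  by_cases hL : -749 ≤ L
  · -- the outer range is nonempty; candidates are nonempty
    have hA : 0 < PySem.Int.floordiv (L + 749) 750 + 1 := by
      rw [PySem.Int.floordiv_eq_ediv_of_pos (a := L + 749) (show (0:Int) < 750 by norm_num)]; omega
    have hrange : PySem.List.pyRange 0 (PySem.Int.floordiv (L + 749) 750 + 1) 1
        = 0 :: PySem.List.pyRange 1 (PySem.Int.floordiv (L + 749) 750 + 1) 1 := by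
      have := PySem.List.pyRange_one_cons (a := 0)
        (b := PySem.Int.floordiv (L + 749) 750 + 1) (by omega)
      simpa using this
    have hne : (PySem.List.pyRange 0 (PySem.Int.floordiv (L + 749) 750 + 1) 1).flatMap (fun a =>
        ((PySem.List.pyRange 0 (PySem.Int.floordiv (L + 999) 1000 + 1) 1).filter
            (fun b => decide (a * 750 + b * 1000 ≥ L))).map
          (fun b => [("a", a), ("b", b), ("spacing", a * 750 + b * 1000 - L)])) ≠ [] := by
      rw [hrange, List.flatMap_cons]
      rw [pvFilter_range L 0 hL le_rfl]
      have hlt : max 0 (PySem.Int.floordiv (L - 750 * 0 + 999) 1000)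
          < PySem.Int.floordiv (L + 999) 1000 + 1 := by
        rw [PySem.Int.floordiv_eq_ediv_of_pos (a := L + 999) (show (0:Int) < 1000 by norm_num),
            PySem.Int.floordiv_eq_ediv_of_pos (a := L - 750 * 0 + 999) (show (0:Int) < 1000 by norm_num)]
        omega
      rw [PySem.List.pyRange_one_cons hlt]
      simp
    have hcongr := PySem.List.foldl_congr_mem
      (PySem.List.pyRange 0 (PySem.Int.floordiv (L + 749) 750 + 1) 1)
      (fun acc a => (((PySem.List.pyRange 0 (PySem.Int.floordiv (L + 999) 1000 + 1) 1).filter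
            (fun b => decide (a * 750 + b * 1000 ≥ L))).map
          (fun b => [("a", a), ("b", b), ("spacing", a * 750 + b * 1000 - L)])).foldl pvMinStep acc)
      (fun acc a => pvMinStep acc
        [("a", a), ("b", max 0 (PySem.Int.floordiv (L - 750 * a + 999) 1000)),
         ("spacing", a * 750 + (max 0 (PySem.Int.floordiv (L - 750 * a + 999) 1000)) * 1000 - L)])
      none
      (by
        intro acc a hmem
        have ha : 0 ≤ a := by
          rw [PySem.List.mem_pyRange_one] at hmem; exact hmem.1
        exact pvBlock_fold L a hL ha acc)
    rw [if_neg hne, pvMin?_eq_foldl, List.foldl_flatMap, hcongr]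
    have hthis := pvFold_corr L (PySem.List.pyRange 0 (PySem.Int.floordiv (L + 749) 750 + 1) 1) none
    simp only [Option.map_none] at hthis
    rw [hthis]
    cases hfold : (PySem.List.pyRange 0 (PySem.Int.floordiv (L + 749) 750 + 1) 1).foldl
        (pvStepB L) none with
    | none => rfl
    | some t => obtain ⟨a, b, s⟩ := t; rfl
  · -- the outer range is empty: both return none
    have hA : PySem.Int.floordiv (L + 749) 750 + 1 ≤ 0 := by
      rw [PySem.Int.floordiv_eq_ediv_of_pos (a := L + 749) (show (0:Int) < 750 by norm_num)]; omega
    rw [PySem.List.pyRange_one_eq_nil hA]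
    simp
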